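-- pv_equiv track=rewrite | github.com/peejh/coding-practice | HackerRank/Problem Solving/algorithms/implement_organizingContainers.py | organizingContainers
-- ===== SOURCE A (Python) =====
-- def organizingContainers(container):
--     '''
--     NOTES:
--
--     The approach taken in this working solution is different from the
--     optimal solution because of the following incorrect assumptions
--     that were considered:
--     - the objective is to sort the balls such that there is only one
--       color type in each container
--     - a color can exceed the next highest available container capacity
--       and its leftover can spill onto another container of smaller
--       capacity
--       e.g.
--             n = 3
--             3
--             1 3
--             1
--       with 3 containers, 5 balls of the first color, and 3 balls of
--       the second color can be sorted as follows
--             4   <- 4 balls of 1st color into 4 capacity container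
--             3   <- 3 balls of 2nd color into 3 capacity container
--             1   <- 1 ball of 1st color into 1 capacity container
--
--     This approach ignores details about swapping and conceptually
--     sorts balls into containers with a specified starting capacity.
--     A solution is 'possible' if the balls can be sorted into the
--     containers.
--     '''
--
--     n = len(container) # number of containers
--
--     # count the capacity of each container
--     color_type_count = 0
--     container_sizes = []
--
--     for c in container:
--         container_sizes.append(sum(c))
--         color_type_count = max(color_type_count, len(c))
--
--     container_sizes = sorted(container_sizes, reverse=True)
--
--     # find the total number of balls for each color
--     ball_counts = [0 for _ in range(color_type_count)]
--
--     for r in range(n): # row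
--         for c in range(len(container[r])): # column
--             ball_counts[c] += container[r][c]
--
--     ball_counts = sorted(ball_counts, reverse=True)
--
--     # match the ball count to the container sizes
--     while len(container_sizes) > 0 and len(ball_counts) > 0:
--         bc = ball_counts[0]
--         cs = container_sizes[0]
--         ball_counts = ball_counts[1:]
--         container_sizes = container_sizes[1:]
--
--         # consider case when the ball count exceeds the next
--         # highest available container capacity
--         if bc > cs:
--             diff = bc - cs
--             ball_counts.append(diff)
--             ball_counts = sorted(ball_counts, reverse=True)
--
--     # a solution is 'impossible' if there are not enough containers
--     # for the balls
--     if len(container_sizes) == 0 and len(ball_counts) > 0: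
--         return 'Impossible'
--
--     return 'Possible'
-- ===== SOURCE B (Python) =====
-- def organizingContainers(container):
--     # container capacities, largest first (the only sort in the program)
--     sizes = sorted((sum(row) for row in container), reverse=True)
--
--     # total balls per color: zip-accumulate the rows into a running list
--     balls = []
--     for row in container:
--         for j, v in enumerate(row):
--             if j < len(balls):
--                 balls[j] += v
--             else:
--                 balls.append(v)
--
--     # unsorted ball pool: for each capacity, scan for the (first) largest
--     # count and reduce it in place; never sorts, pops or reinserts remainders
--     for s in sizes:
--         if not balls:
--             break
--         i = balls.index(max(balls))
--         if balls[i] > s: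
--             balls[i] -= s
--         else:
--             balls.pop(i)
--
--     return 'Impossible' if balls else 'Possible'
-- ===== Notes on version B (the rewrite author's own statement) =====
-- stated objective: alternative
-- what changed: B never keeps the ball counts sorted: instead of A's sort + pop-head + append-remainder + full re-sort every iteration, B holds the counts in an unsorted pool, scans for the current maximum each step and subtracts the capacity in place (or pops the entry), which is correct because the greedy only ever needs the maximum value and the outcome depends only on the multiset of counts; the column totals are built by zip-accumulating rows instead of indexing into a preallocated zero list.
import Mathlib
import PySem

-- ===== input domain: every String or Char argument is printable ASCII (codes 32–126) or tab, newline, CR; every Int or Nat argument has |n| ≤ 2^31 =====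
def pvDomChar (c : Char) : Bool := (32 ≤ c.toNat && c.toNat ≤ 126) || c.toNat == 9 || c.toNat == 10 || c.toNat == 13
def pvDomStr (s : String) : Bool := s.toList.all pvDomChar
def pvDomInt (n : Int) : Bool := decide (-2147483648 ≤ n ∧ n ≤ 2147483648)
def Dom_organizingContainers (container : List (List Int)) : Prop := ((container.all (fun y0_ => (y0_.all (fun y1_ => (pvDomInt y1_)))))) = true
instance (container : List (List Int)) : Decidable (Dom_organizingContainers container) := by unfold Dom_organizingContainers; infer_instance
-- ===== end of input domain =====

-- B keeps the ball counts as an UNSORTED pool (scan for the max, subtract in place /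
-- pop) instead of A's sorted list with pop-head and a full re-sort after every spill.

-- ===== PORT A =====

-- A's inner double loop 'for c in range(len(container[r])): ball_counts[c] += container[r][c]':
-- add the row to the corresponding prefix slots of the accumulator, left to right.
-- (c < len(ball_counts) always holds in A, since ball_counts has the maximal row length;
-- the second clause is unreachable under A's call.)
def pvBumpPrefix : List Int → List Int → List Int
  | [], bs => bs
  | _ :: _, [] => []
  | v :: vs, b :: bs => (b + v) :: pvBumpPrefix vs bs

-- the while loop of A: pop the largest ball count and container size; on a spill,
-- append the remainder and RE-SORT the whole list (as A does)
def pvLoopA : List Int → List Int → List Int × List Int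
  | [], bs => ([], bs)
  | cs :: rest, [] => (cs :: rest, [])
  | cs :: rest, bc :: bt =>
      if bc > cs then pvLoopA rest (PySem.List.sorted (bt ++ [bc - cs]) (fun x => x) true)
      else pvLoopA rest bt

def organizingContainers (container : List (List Int)) : String :=
  -- first loop: collect container sizes (row sums) and the max row length
  let p := container.foldl
      (fun (acc : List Int × Nat) c => (acc.1 ++ [c.foldl (· + ·) 0], max acc.2 c.length))
      ([], 0)
  let container_sizes := PySem.List.sorted p.1 (fun x => x) true
  -- ball_counts = [0]*color_type_count, then the nested index loops
  let ball_counts : List Int := List.replicate p.2 0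
  let ball_counts := container.foldl (fun bs row => pvBumpPrefix row bs) ball_counts
  let ball_counts := PySem.List.sorted ball_counts (fun x => x) true
  let r := pvLoopA container_sizes ball_counts
  if r.1.isEmpty && !r.2.isEmpty then "Impossible" else "Possible"

-- ===== PORT B =====

-- Source B's zip-accumulation of a row onto the running column sums
def pvAddRow : List Int → List Int → List Int
  | bs, [] => bs
  | [], v :: vs => v :: pvAddRow [] vs
  | b :: bs, v :: vs => (b + v) :: pvAddRow bs vs

-- Source B's 'i = balls.index(max(balls)); balls[i] -= s or balls.pop(i)', fused:
-- at the FIRST occurrence of the max value m, subtract s in place or drop the entry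
def pvSubMax : List Int → Int → Int → List Int
  | [], _, _ => []
  | x :: xs, m, s =>
      if x = m then (if m > s then (m - s) :: xs else xs)
      else x :: pvSubMax xs m s

-- one iteration of Source B's for-loop body ('if not balls: break' = no-op on empty)
def pvStepB (bs : List Int) (s : Int) : List Int :=
  match PySem.List.max? bs (fun x => x) with
  | none => bs
  | some m => pvSubMax bs m s

def organizingContainers_alt (container : List (List Int)) : String :=
  let sizes := PySem.List.sorted (container.map (fun row => row.foldl (· + ·) 0)) (fun x => x) true
  let balls := container.foldl (fun bs row => pvAddRow bs row) []
  let balls := sizes.foldl pvStepB balls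
  if balls.isEmpty then "Possible" else "Impossible"

-- ===== PRECONDITION & SPEC =====
def Spec_organizingContainers (container : List (List Int)) (out : String) : Prop := out = organizingContainers_alt container
instance (container : List (List Int)) (out : String) : Decidable (Spec_organizingContainers container out) := by unfold Spec_organizingContainers; infer_instance

-- ===== CLAIM (what is proved, stated in full; the proofs are below) =====
def Claim_equal_organizingContainers : Prop := ∀ (container : List (List Int)), Dom_organizingContainers container → Spec_organizingContainers container (organizingContainers container)

-- ===== LEMMAS AND PROOFS =====

-- A's first loop computes (map of row sums, fold of max lengths)
theorem pvFirstLoop (container : List (List Int)) (l0 : List Int) (k0 : Nat) :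
    container.foldl
      (fun (acc : List Int × Nat) c => (acc.1 ++ [c.foldl (· + ·) 0], max acc.2 c.length))
      (l0, k0)
    = (l0 ++ container.map (fun row => row.foldl (· + ·) 0),
       container.foldl (fun k c => max k c.length) k0) := by
  induction container generalizing l0 k0 with
  | nil => simp
  | cons r t ih => simp [ih]

theorem pvAddRow_length (bs row : List Int) :
    (pvAddRow bs row).length = max bs.length row.length := by
  induction row generalizing bs with
  | nil => simp [pvAddRow]
  | cons v vs ih =>
    cases bs with
    | nil => simp [pvAddRow, ih]
    | cons b bt =>
      simp only [pvAddRow, List.length_cons, ih]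
      omega

-- bumping a padded accumulator = zip-accumulating, re-padded
theorem pvBump_pad (row B : List Int) (k : Nat) (h : row.length ≤ B.length + k) :
    pvBumpPrefix row (B ++ List.replicate k 0)
      = pvAddRow B row ++ List.replicate (B.length + k - (pvAddRow B row).length) 0 := by
  induction row generalizing B k with
  | nil => simp [pvBumpPrefix, pvAddRow]
  | cons v vs ih =>
    cases B with
    | cons b bt =>
      simp only [pvBumpPrefix, pvAddRow, List.cons_append, List.length_cons]
      rw [ih bt k (by simp at h; omega)]
      simp only [pvAddRow_length]
      have he : bt.length + k - max bt.length vs.length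
          = bt.length + 1 + k - (max bt.length vs.length + 1) := by omega
      rw [he]
    | nil =>
      cases k with
      | zero => simp at h
      | succ k' =>
        have hrep : (List.replicate (k' + 1) (0 : Int)) = 0 :: List.replicate k' 0 := rfl
        simp only [List.nil_append, hrep, pvBumpPrefix, pvAddRow]
        have := ih [] k' (by simpa using h)
        simp only [List.nil_append] at this
        rw [this]
        simp only [pvAddRow_length, List.length_nil, List.length_cons, List.cons_append,
          zero_add]
        have he : k' - max 0 vs.length = k' + 1 - (max 0 vs.length + 1) := by omega
        rw [he]

theorem pvFold_pad (rows : List (List Int)) (W : Nat) (B : List Int)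
    (hB : B.length ≤ W) (hrows : ∀ row ∈ rows, row.length ≤ W) :
    rows.foldl (fun bs row => pvBumpPrefix row bs) (B ++ List.replicate (W - B.length) 0)
      = (rows.foldl (fun bs row => pvAddRow bs row) B)
        ++ List.replicate (W - (rows.foldl (fun bs row => pvAddRow bs row) B).length) 0 := by
  induction rows generalizing B with
  | nil => simp
  | cons r t ih =>
    have hr : r.length ≤ W := hrows r (by simp)
    have hlen : (pvAddRow B r).length = max B.length r.length := pvAddRow_length B r
    have hstep : pvBumpPrefix r (B ++ List.replicate (W - B.length) 0)
        = pvAddRow B r ++ List.replicate (W - (pvAddRow B r).length) 0 := by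
      have := pvBump_pad r B (W - B.length) (by omega)
      rw [this]
      congr 2
      omega
    simp only [List.foldl_cons, hstep]
    exact ih (pvAddRow B r) (by omega) (fun row hrow => hrows row (by simp [hrow]))

theorem pvFoldAddRow_length (rows : List (List Int)) (B : List Int) :
    (rows.foldl (fun bs row => pvAddRow bs row) B).length
      = rows.foldl (fun k c => max k c.length) B.length := by
  induction rows generalizing B with
  | nil => rfl
  | cons r t ih => simp only [List.foldl_cons, ih, pvAddRow_length]

-- A's ball-count computation equals B's
theorem pvBalls_eq (container : List (List Int)) :
    container.foldl (fun bs row => pvBumpPrefix row bs)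
        (List.replicate (container.foldl (fun k c => max k c.length) 0) 0)
      = container.foldl (fun bs row => pvAddRow bs row) [] := by
  set W := container.foldl (fun k c => max k c.length) 0 with hW
  have hrows : ∀ row ∈ container, row.length ≤ W := by
    intro row hrow
    have := PySem.List.le_foldl_max_nat container (fun c => c.length) 0
    exact this.2 row hrow
  have h := pvFold_pad container W [] (by simp) hrows
  simp only [List.length_nil, List.nil_append, Nat.sub_zero] at h
  rw [h, pvFoldAddRow_length]
  simp [← hW]

-- B's in-place update at the first max = cons/erase at the multiset level
theorem pvSubMax_perm (bs : List Int) (m s : Int) (hm : m ∈ bs) :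
    (pvSubMax bs m s).Perm (if m > s then (m - s) :: bs.erase m else bs.erase m) := by
  induction bs with
  | nil => cases hm
  | cons x xs ih =>
    by_cases hx : x = m
    · subst hx
      simp only [pvSubMax, List.erase_cons_head]
      split_ifs <;> exact List.Perm.refl _
    · have hm' : m ∈ xs := by
        rcases List.mem_cons.mp hm with h | h
        · exact absurd h.symm hx
        · exact h
      have herase : (x :: xs).erase m = x :: xs.erase m :=
        List.erase_cons_tail (by simpa using hx)
      simp only [pvSubMax, if_neg hx, herase]
      split_ifs with hgt
      · have := (ih hm')
        simp only [if_pos hgt] at this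
        exact (this.cons x).trans (List.Perm.swap (m - s) x (xs.erase m))
      · have := (ih hm')
        simp only [if_neg hgt] at this
        exact this.cons x

-- once the ball pool is empty, Source B's loop leaves it empty (the 'break')
theorem pvFoldStepB_nil (cs : List Int) : cs.foldl pvStepB [] = [] := by
  induction cs with
  | nil => rfl
  | cons c rest ih => simpa [pvStepB, PySem.List.max?] using ih

-- main invariant: B's unsorted pool stays a permutation of A's sorted list,
-- and A's loop empties the balls whenever it leaves containers over
theorem pvLoop_perm (cs : List Int) (bsA bsB : List Int) (h : bsB.Perm bsA)
    (hs : bsA.Pairwise (fun a b => b ≤ a)) :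
    (cs.foldl pvStepB bsB).Perm (pvLoopA cs bsA).2
      ∧ ((pvLoopA cs bsA).1 ≠ [] → (pvLoopA cs bsA).2 = []) := by
  induction cs generalizing bsA bsB with
  | nil =>
    refine ⟨h, fun hne => ?_⟩
    simp [pvLoopA] at hne
  | cons c rest ih =>
    cases bsA with
    | nil =>
      have hB : bsB = [] := List.Perm.eq_nil h
      subst hB
      have h0 : pvStepB [] c = [] := rfl
      exact ⟨by simp [pvLoopA, List.foldl_cons, h0, pvFoldStepB_nil],
        fun _ => by simp [pvLoopA]⟩
    | cons bc bt =>
      rcases List.pairwise_cons.mp hs with ⟨hbc, hbt⟩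
      -- the max of the pool is the head of the sorted list
      have hne : bsB ≠ [] := by
        intro hB; subst hB
        exact List.cons_ne_nil bc bt (List.nil_perm.mp h)
      obtain ⟨m, hm⟩ : ∃ m, PySem.List.max? bsB (fun x => x) = some m := by
        cases hmx : PySem.List.max? bsB (fun x => x) with
        | none =>
          rw [PySem.List.max?_eq_none_iff] at hmx
          exact absurd hmx hne
        | some m => exact ⟨m, rfl⟩
      have hmmem : m ∈ bsB := PySem.List.max?_mem hm
      have hmax : ∀ y ∈ bsB, y ≤ m := PySem.List.max?_isMax hm
      have hmbc : m = bc := by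
        have h1 : m ≤ bc := by
          rcases List.mem_cons.mp (h.subset hmmem) with rfl | hmem
          · exact le_refl _
          · exact hbc m hmem
        have h2 : bc ≤ m := hmax bc (h.symm.subset (List.mem_cons_self))
        exact le_antisymm h1 h2
      subst hmbc
      have herase : (bsB.erase m).Perm bt := by
        have := h.erase m
        simpa using this
      simp only [List.foldl_cons, pvStepB, hm, pvLoopA]
      by_cases hgt : m > c
      · have hperm : (pvSubMax bsB m c).Perm ((m - c) :: bt) := by
          have := pvSubMax_perm bsB m c hmmem
          simp only [if_pos hgt] at this
          exact this.trans (herase.cons (m - c))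
        have hA : ((m - c) :: bt).Perm
            (PySem.List.sorted (bt ++ [m - c]) (fun x => x) true) := by
          exact (List.perm_append_singleton (m - c) bt).symm.trans
            (PySem.List.sorted_perm (bt ++ [m - c]) (fun x => x) true).symm
        simp only [if_pos hgt]
        exact ih (PySem.List.sorted (bt ++ [m - c]) (fun x => x) true)
          (pvSubMax bsB m c) (hperm.trans hA)
          (PySem.List.sorted_pairwise_rev (bt ++ [m - c]) (fun x => x))
      · have hperm : (pvSubMax bsB m c).Perm bt := by
          have := pvSubMax_perm bsB m c hmmem
          simp only [if_neg hgt] at this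
          exact this.trans herase
        simp only [if_neg hgt]
        exact ih bt (pvSubMax bsB m c) hperm hbt

-- ===== VERDICT (by name: the statement is the Claim_ definition above) =====
theorem organizingContainers_spec : Claim_equal_organizingContainers := by
  intro container _
  unfold Spec_organizingContainers organizingContainers organizingContainers_alt
  simp only [pvFirstLoop, List.nil_append, pvBalls_eq]
  set sizes := PySem.List.sorted (container.map (fun row => row.foldl (· + ·) 0)) (fun x => x) true
  set ballsB := container.foldl (fun bs row => pvAddRow bs row) [] with hB
  set ballsA := PySem.List.sorted ballsB (fun x => x) true with hA
  have hperm : ballsB.Perm ballsA :=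
    (PySem.List.sorted_perm ballsB (fun x => x) true).symm
  have hpw : ballsA.Pairwise (fun a b : Int => b ≤ a) :=
    PySem.List.sorted_pairwise_rev ballsB (fun x => x)
  obtain ⟨h1, h2⟩ := pvLoop_perm sizes ballsA ballsB hperm hpw
  by_cases hAe : (pvLoopA sizes ballsA).1 = []
  · have hlen := h1.length_eq
    by_cases hbe : (pvLoopA sizes ballsA).2 = []
    · have : sizes.foldl pvStepB ballsB = [] := by
        apply List.eq_nil_of_length_eq_zero; rw [hlen, hbe]; rfl
      simp [hAe, hbe, this]
    · have hne : sizes.foldl pvStepB ballsB ≠ [] := by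
        intro hc
        apply hbe
        apply List.eq_nil_of_length_eq_zero
        rw [← hlen, hc]; rfl
      simp [hAe, hbe, hne]
  · have hb := h2 hAe
    have : sizes.foldl pvStepB ballsB = [] := by
      apply List.eq_nil_of_length_eq_zero; rw [h1.length_eq, hb]; rfl
    simp [hb, this]
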